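-- pv_equiv track=rewrite | github.com/sophiazhen/ai-notebook | src/lightgbm_semi_trainer.py | _categorize_sensor_features
-- ===== SOURCE A (Python) =====
-- from typing import Dict, Any, Optional, List
--
-- def _categorize_sensor_features(feature_names: List[str]) -> Dict[str, List[str]]:
--     """
--     Categorize sensor features for semiconductor manufacturing.
--
--     Args:
--         feature_names: List of feature names
--
--     Returns:
--         Dict mapping categories to feature lists
--     """
--     categories = {
--         'oes_spectral': [f for f in feature_names if f.startswith('OES_')],
--         'power_rf': [f for f in feature_names if 'RF_Source_Power_' in f],
--         'pressure_chamber': [f for f in feature_names if 'Chamber_Pressure_' in f],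
--         'oes_stability': [f for f in feature_names if f.startswith('OES_') and f.endswith('_stdev')],
--         'power_stability': [f for f in feature_names if 'RF_Source_Power_' in f and 'stdev' in f],
--         'pressure_stability': [f for f in feature_names if 'Chamber_Pressure_' in f and 'stdev' in f]
--     }
--
--     # Add categorical features (wafer lots, recipes, tools)
--     categories['manufacturing_meta'] = [f for f in feature_names
--                                       if any(meta in f.lower() for meta in ['tool_id', 'recipe_id', 'lot_id'])]
--
--     return categories
-- ===== SOURCE B (Python) =====
-- from typing import Dict, List
--
-- def _categorize_sensor_features(feature_names: List[str]) -> Dict[str, List[str]]: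
--     """Single-pass classification: one loop over feature_names appending each
--     feature to every matching category, instead of seven filtered scans."""
--     categories = {k: [] for k in (
--         'oes_spectral', 'power_rf', 'pressure_chamber',
--         'oes_stability', 'power_stability', 'pressure_stability',
--         'manufacturing_meta')}
--     for f in feature_names:
--         if f.startswith('OES_'):
--             categories['oes_spectral'].append(f)
--             if f.endswith('_stdev'):
--                 categories['oes_stability'].append(f)
--         if 'RF_Source_Power_' in f:
--             categories['power_rf'].append(f)
--             if 'stdev' in f:
--                 categories['power_stability'].append(f)
--         if 'Chamber_Pressure_' in f:
--             categories['pressure_chamber'].append(f)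
--             if 'stdev' in f:
--                 categories['pressure_stability'].append(f)
--         lf = f.lower()
--         if any(meta in lf for meta in ('tool_id', 'recipe_id', 'lot_id')):
--             categories['manufacturing_meta'].append(f)
--     return categories
-- ===== Notes on version B (the rewrite author's own statement) =====
-- stated objective: alternative
-- what changed: Replaces seven separate filtered scans of feature_names (A) with a single classify-per-element pass that appends each feature to every matching category list (B).
import Mathlib
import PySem

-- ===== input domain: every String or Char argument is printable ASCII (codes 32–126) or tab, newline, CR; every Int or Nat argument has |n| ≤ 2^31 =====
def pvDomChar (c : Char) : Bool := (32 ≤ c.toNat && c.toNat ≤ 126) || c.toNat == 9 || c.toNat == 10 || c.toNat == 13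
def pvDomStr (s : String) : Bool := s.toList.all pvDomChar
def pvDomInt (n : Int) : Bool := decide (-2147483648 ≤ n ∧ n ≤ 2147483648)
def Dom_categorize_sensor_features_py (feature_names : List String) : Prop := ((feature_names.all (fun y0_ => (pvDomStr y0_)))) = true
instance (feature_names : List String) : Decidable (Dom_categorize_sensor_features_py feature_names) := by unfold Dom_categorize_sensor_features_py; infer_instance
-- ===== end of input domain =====

-- B replaces A's seven filtered scans with one classify-per-element pass; objective: alternative (one pass instead of seven).

-- ===== PORT A =====
-- Seven list comprehensions, one per category, assembled in dict insertion order.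
def categorize_sensor_features_py (feature_names : List String) : List (String × List String) :=
  [("oes_spectral", feature_names.filter (fun f => PySem.Str.startswith f "OES_")),
   ("power_rf", feature_names.filter (fun f => PySem.Str.isIn "RF_Source_Power_" f)),
   ("pressure_chamber", feature_names.filter (fun f => PySem.Str.isIn "Chamber_Pressure_" f)),
   ("oes_stability", feature_names.filter (fun f => PySem.Str.startswith f "OES_" && PySem.Str.endswith f "_stdev")),
   ("power_stability", feature_names.filter (fun f => PySem.Str.isIn "RF_Source_Power_" f && PySem.Str.isIn "stdev" f)),
   ("pressure_stability", feature_names.filter (fun f => PySem.Str.isIn "Chamber_Pressure_" f && PySem.Str.isIn "stdev" f)),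
   ("manufacturing_meta", feature_names.filter (fun f => ["tool_id", "recipe_id", "lot_id"].any (fun m => PySem.Str.isIn m (PySem.Str.lower f))))]

-- ===== PORT B =====
-- State of B's single loop: the seven category lists.
structure PvCats where
  oes : List String
  prf : List String
  pch : List String
  oesSt : List String
  pwSt : List String
  prSt : List String
  mfg : List String
deriving Repr, DecidableEq

-- One iteration of B's loop: append f to every matching category.
def pvStep (c : PvCats) (f : String) : PvCats :=
  let c1 := if PySem.Str.startswith f "OES_" then
              { c with oes := c.oes ++ [f],
                       oesSt := if PySem.Str.endswith f "_stdev" then c.oesSt ++ [f] else c.oesSt }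
            else c
  let c2 := if PySem.Str.isIn "RF_Source_Power_" f then
              { c1 with prf := c1.prf ++ [f],
                        pwSt := if PySem.Str.isIn "stdev" f then c1.pwSt ++ [f] else c1.pwSt }
            else c1
  let c3 := if PySem.Str.isIn "Chamber_Pressure_" f then
              { c2 with pch := c2.pch ++ [f],
                        prSt := if PySem.Str.isIn "stdev" f then c2.prSt ++ [f] else c2.prSt }
            else c2
  if ["tool_id", "recipe_id", "lot_id"].any (fun m => PySem.Str.isIn m (PySem.Str.lower f)) then
    { c3 with mfg := c3.mfg ++ [f] }
  else c3

def categorize_sensor_features_py_alt (feature_names : List String) : List (String × List String) :=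
  let r := feature_names.foldl pvStep ⟨[], [], [], [], [], [], []⟩
  [("oes_spectral", r.oes), ("power_rf", r.prf), ("pressure_chamber", r.pch),
   ("oes_stability", r.oesSt), ("power_stability", r.pwSt), ("pressure_stability", r.prSt),
   ("manufacturing_meta", r.mfg)]

-- ===== PRECONDITION & SPEC =====
def Spec_categorize_sensor_features_py (feature_names : List String) (out : List (String × List String)) : Prop := out = categorize_sensor_features_py_alt feature_names
instance (feature_names : List String) (out : List (String × List String)) : Decidable (Spec_categorize_sensor_features_py feature_names out) := by unfold Spec_categorize_sensor_features_py; infer_instance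

-- ===== CLAIM (what is proved, stated in full; the proofs are below) =====
def Claim_equal_categorize_sensor_features_py : Prop := ∀ (feature_names : List String), Dom_categorize_sensor_features_py feature_names → Spec_categorize_sensor_features_py feature_names (categorize_sensor_features_py feature_names)

-- ===== LEMMAS AND PROOFS =====

-- One step of B's loop appends f to exactly the categories whose predicate holds.
lemma pvStep_eq (c : PvCats) (f : String) :
    pvStep c f =
      ⟨c.oes ++ if PySem.Str.startswith f "OES_" then [f] else [],
       c.prf ++ if PySem.Str.isIn "RF_Source_Power_" f then [f] else [],
       c.pch ++ if PySem.Str.isIn "Chamber_Pressure_" f then [f] else [],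
       c.oesSt ++ if PySem.Str.startswith f "OES_" && PySem.Str.endswith f "_stdev" then [f] else [],
       c.pwSt ++ if PySem.Str.isIn "RF_Source_Power_" f && PySem.Str.isIn "stdev" f then [f] else [],
       c.prSt ++ if PySem.Str.isIn "Chamber_Pressure_" f && PySem.Str.isIn "stdev" f then [f] else [],
       c.mfg ++ if ["tool_id", "recipe_id", "lot_id"].any (fun m => PySem.Str.isIn m (PySem.Str.lower f)) then [f] else []⟩ := by
  unfold pvStep
  split_ifs <;> simp_all

-- B's fold computes, in each component, the accumulator followed by A's filter.
lemma pvFold_eq (fs : List String) : ∀ (c : PvCats),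
    fs.foldl pvStep c =
      ⟨c.oes ++ fs.filter (fun f => PySem.Str.startswith f "OES_"),
       c.prf ++ fs.filter (fun f => PySem.Str.isIn "RF_Source_Power_" f),
       c.pch ++ fs.filter (fun f => PySem.Str.isIn "Chamber_Pressure_" f),
       c.oesSt ++ fs.filter (fun f => PySem.Str.startswith f "OES_" && PySem.Str.endswith f "_stdev"),
       c.pwSt ++ fs.filter (fun f => PySem.Str.isIn "RF_Source_Power_" f && PySem.Str.isIn "stdev" f),
       c.prSt ++ fs.filter (fun f => PySem.Str.isIn "Chamber_Pressure_" f && PySem.Str.isIn "stdev" f),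
       c.mfg ++ fs.filter (fun f => ["tool_id", "recipe_id", "lot_id"].any (fun m => PySem.Str.isIn m (PySem.Str.lower f)))⟩ := by
  induction fs with
  | nil => intro c; simp
  | cons f fs ih =>
    intro c
    rw [List.foldl_cons, pvStep_eq, ih]
    simp only [List.filter_cons]
    split_ifs <;> simp_all

-- ===== VERDICT (by name: the statement is the Claim_ definition above) =====
theorem categorize_sensor_features_py_spec : Claim_equal_categorize_sensor_features_py := by
  intro fs _
  unfold Spec_categorize_sensor_features_py categorize_sensor_features_py categorize_sensor_features_py_alt
  rw [pvFold_eq]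
  simp
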